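-- pv_equiv track=rewrite | github.com/Nopnatee/KaLLaM-Motivational-Therapeutic-Advisor | src/kallam/domain/judges/raw_llm_scorer.py | _fill_user_sequence
-- ===== SOURCE A (Python) =====
-- from typing import Any, Dict, List, Optional, Tuple, Union
--
-- def _fill_user_sequence(user_emotions: List[str]) -> List[Optional[str]]:
--     """
--     Shift user emotions so index i aligns to assistant turn i (user at t vs assistant at t).
--     In many chats, turns alternate; to be safer, we simply reuse last seen user emotion.
--     """
--     out: List[Optional[str]] = []
--     last = None
--     for emo in user_emotions:
--         last = emo or last
--         out.append(last)
--     # If assistant has more turns, pad with last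
--     if out:
--         last = out[-1]
--     return out
-- ===== SOURCE B (Python) =====
-- from typing import List, Optional
--
-- def _fill_user_sequence(user_emotions: List[str]) -> List[Optional[str]]:
--     def go(xs, last):
--         if not xs:
--             return []
--         cur = xs[0] or last
--         return [cur] + go(xs[1:], cur)
--     return go(user_emotions, None)
-- ===== Notes on version B (the rewrite author's own statement) =====
-- stated objective: simpler
-- what changed: Replaces the accumulate-loop with append and the dead 'if out: last = out[-1]' block by a direct structural recursion that builds the result front-to-back carrying the last truthy value.
import Mathlib
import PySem

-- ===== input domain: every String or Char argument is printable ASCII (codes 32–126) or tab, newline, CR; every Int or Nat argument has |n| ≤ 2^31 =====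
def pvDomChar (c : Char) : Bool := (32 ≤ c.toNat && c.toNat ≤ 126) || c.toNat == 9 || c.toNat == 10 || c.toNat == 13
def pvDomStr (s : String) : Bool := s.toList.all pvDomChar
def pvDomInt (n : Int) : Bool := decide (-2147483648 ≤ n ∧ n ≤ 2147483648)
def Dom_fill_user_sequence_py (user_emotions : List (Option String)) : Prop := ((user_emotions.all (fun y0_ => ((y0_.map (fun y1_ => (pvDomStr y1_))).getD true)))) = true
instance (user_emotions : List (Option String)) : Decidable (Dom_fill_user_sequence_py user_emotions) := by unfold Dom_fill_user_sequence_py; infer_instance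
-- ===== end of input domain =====

-- B replaces A's accumulate-loop (and its dead 'if out: last = out[-1]' block) by a structural recursion; objective: simpler.

-- ===== PORT A =====
-- Python truthiness of 'emo or last' for emo : Option String (None and "" are falsy)
def pvOrEmo (emo last : Option String) : Option String :=
  match emo with
  | none => last
  | some s => if s = "" then last else some s

def fill_user_sequence_py (user_emotions : List (Option String)) : List (Option String) :=
  -- out = []; last = None; for emo in ...: last = emo or last; out.append(last)
  let st := user_emotions.foldl
    (fun (st : List (Option String) × Option String) emo =>
      let last := pvOrEmo emo st.2
      (st.1 ++ [last], last))
    ([], none)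
  -- 'if out: last = out[-1]' has no effect on the return value
  st.1

-- ===== PORT B =====
def fillGo : List (Option String) → Option String → List (Option String)
  | [], _ => []
  | x :: xs, last =>
    let cur := pvOrEmo x last
    cur :: fillGo xs cur

def fill_user_sequence_py_alt (user_emotions : List (Option String)) : List (Option String) :=
  fillGo user_emotions none

-- ===== PRECONDITION & SPEC =====
def Spec_fill_user_sequence_py (user_emotions : List (Option String)) (out : List (Option String)) : Prop := out = fill_user_sequence_py_alt user_emotions
instance (user_emotions : List (Option String)) (out : List (Option String)) : Decidable (Spec_fill_user_sequence_py user_emotions out) := by unfold Spec_fill_user_sequence_py; infer_instance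

-- ===== CLAIM (what is proved, stated in full; the proofs are below) =====
def Claim_equal_fill_user_sequence_py : Prop := ∀ (user_emotions : List (Option String)), Dom_fill_user_sequence_py user_emotions → Spec_fill_user_sequence_py user_emotions (fill_user_sequence_py user_emotions)

-- ===== LEMMAS AND PROOFS =====
theorem foldl_fill_eq_fillGo (xs : List (Option String)) (out : List (Option String)) (last : Option String) :
    (xs.foldl
      (fun (st : List (Option String) × Option String) emo =>
        let l := pvOrEmo emo st.2
        (st.1 ++ [l], l))
      (out, last)).1 = out ++ fillGo xs last := by
  induction xs generalizing out last with
  | nil => simp [fillGo]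
  | cons x xs ih => simp [List.foldl, fillGo, ih]

-- ===== VERDICT (by name: the statement is the Claim_ definition above) =====
theorem fill_user_sequence_py_spec : Claim_equal_fill_user_sequence_py := by
  intro ue _
  unfold Spec_fill_user_sequence_py fill_user_sequence_py fill_user_sequence_py_alt
  simpa using foldl_fill_eq_fillGo ue [] none
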